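-- pv_equiv track=rewrite | github.com/WindzJC/emailautomation | precheck_leads.py | is_role_account
-- ===== SOURCE A (Python) =====
-- ROLE_PREFIXES = {"admin","support","info","sales","billing","contact","help","abuse","postmaster","noreply","no-reply"}
--
-- def is_role_account(local: str) -> bool:
--     for prefix in ROLE_PREFIXES:
--         if local == prefix:
--             return True
--         if local.startswith(prefix) and len(local) > len(prefix):
--             sep = local[len(prefix)]
--             if sep in {".", "-", "_", "+"}:
--                 return True
--     return False
-- ===== SOURCE B (Python) =====
-- ROLE_PREFIXES = {"admin","support","info","sales","billing","contact","help","abuse","postmaster","noreply","no-reply"}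
-- SEPARATORS = {".", "-", "_", "+"}
--
-- def is_role_account(local: str) -> bool:
--     if local in ROLE_PREFIXES:
--         return True
--     for i, ch in enumerate(local):
--         if ch in SEPARATORS and local[:i] in ROLE_PREFIXES:
--             return True
--     return False
-- ===== Notes on version B (the rewrite author's own statement) =====
-- stated objective: alternative
-- what changed: B scans the input string once, and at each separator character looks the preceding slice up in the prefix set (plus one whole-string lookup), instead of A's loop over all prefixes with repeated startswith tests.
import Mathlib
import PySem

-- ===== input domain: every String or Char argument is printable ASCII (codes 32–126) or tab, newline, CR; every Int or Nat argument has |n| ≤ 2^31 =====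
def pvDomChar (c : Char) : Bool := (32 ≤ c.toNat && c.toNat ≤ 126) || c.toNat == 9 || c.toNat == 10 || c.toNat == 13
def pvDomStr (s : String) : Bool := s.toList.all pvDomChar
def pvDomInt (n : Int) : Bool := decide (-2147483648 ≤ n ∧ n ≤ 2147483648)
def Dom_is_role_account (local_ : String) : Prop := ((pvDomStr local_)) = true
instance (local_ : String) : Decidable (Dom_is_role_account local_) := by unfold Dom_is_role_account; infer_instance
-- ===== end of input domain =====

-- B replaces A's loop over the prefix set (with startswith per prefix) by one left-to-right scan
-- of the string that looks the slice before each separator up in the prefix set; alternative, not faster.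

-- the module-level set ROLE_PREFIXES (as code-point lists; its literal has no duplicates)
def rolePrefixes : PySem.Set (List Char) :=
  PySem.Set.ofList (["admin","support","info","sales","billing","contact","help","abuse","postmaster","noreply","no-reply"].map String.toList)

-- the separator-set literal {".", "-", "_", "+"} (one-char strings, as Chars)
def sepChars : PySem.Set Char := PySem.Set.ofList ['.', '-', '_', '+']

-- ===== PORT A =====
-- the 'for prefix in ROLE_PREFIXES' loop; sep = local[len(prefix)] via pyGet? (the index is in
-- range whenever that branch is reached, so the none case is unreachable and falls through)
def roleLoopA (cs : List Char) : List (List Char) → Bool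
  | [] => false
  | p :: rest =>
    if cs = p then true
    else if PySem.Chars.startswith cs p && decide ((PySem.Chars.len p : Int) < (PySem.Chars.len cs : Int)) then
      match PySem.Chars.pyGet? cs ((PySem.Chars.len p : Int)) with
      | some sep => if PySem.Set.contains sepChars sep then true else roleLoopA cs rest
      | none => roleLoopA cs rest
    else roleLoopA cs rest

def is_role_account (local_ : String) : Bool := roleLoopA local_.toList rolePrefixes

-- ===== PORT B =====
-- the 'for i, ch in enumerate(local)' loop; local[:i] is Chars.slice
def roleLoopB (cs : List Char) : List (Int × Char) → Bool
  | [] => false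
  | (i, ch) :: rest =>
    if PySem.Set.contains sepChars ch &&
       PySem.Set.contains rolePrefixes (PySem.Chars.slice cs none (some i)) then true
    else roleLoopB cs rest

def is_role_account_alt (local_ : String) : Bool :=
  if PySem.Set.contains rolePrefixes local_.toList then true
  else roleLoopB local_.toList (PySem.List.enumerate local_.toList)

-- ===== PRECONDITION & SPEC =====
def Spec_is_role_account (local_ : String) (out : Bool) : Prop := out = is_role_account_alt local_
instance (local_ : String) (out : Bool) : Decidable (Spec_is_role_account local_ out) := by unfold Spec_is_role_account; infer_instance

-- ===== CLAIM (what is proved, stated in full; the proofs are below) =====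
def Claim_equal_is_role_account : Prop := ∀ (local_ : String), Dom_is_role_account local_ → Spec_is_role_account local_ (is_role_account local_)

-- ===== LEMMAS AND PROOFS =====

-- the common existential description of a positive answer
def hits (cs p : List Char) : Prop :=
  cs = p ∨ (p <+: cs ∧ p.length < cs.length ∧ ∃ sep, cs[p.length]? = some sep ∧ sep ∈ ['.', '-', '_', '+'])

theorem contains_sepChars (c : Char) :
    PySem.Set.contains sepChars c = true ↔ c ∈ ['.', '-', '_', '+'] := by
  rw [PySem.Set.contains_iff]
  simp [sepChars, PySem.Set.mem_ofList]

theorem roleLoopA_iff (cs : List Char) (ps : List (List Char)) :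
    roleLoopA cs ps = true ↔ ∃ p ∈ ps, hits cs p := by
  induction ps with
  | nil => simp [roleLoopA]
  | cons p rest ih =>
    simp only [roleLoopA]
    by_cases h1 : cs = p
    · simp only [if_pos h1, true_iff]
      exact ⟨p, List.mem_cons_self .., Or.inl h1⟩
    · rw [if_neg h1]
      by_cases h2 : PySem.Chars.startswith cs p = true ∧ (PySem.Chars.len p : Int) < (PySem.Chars.len cs : Int)
      · obtain ⟨hs, hl⟩ := h2
        have hpre : p <+: cs := (PySem.Chars.startswith_iff cs p).mp hs
        have hlen : p.length < cs.length := by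
          rw [PySem.Chars.len_eq, PySem.Chars.len_eq] at hl; exact_mod_cast hl
        have hg : PySem.Chars.pyGet? cs (PySem.Chars.len p) = some cs[p.length] := by
          rw [PySem.Chars.len_eq]
          simp [List.getElem?_eq_getElem hlen]
        rw [if_pos (by simp [hs]; exact hlen), hg]
        show (if sepChars.contains cs[p.length] = true then true else roleLoopA cs rest) = true ↔
          ∃ q ∈ p :: rest, hits cs q
        by_cases h3 : cs[p.length] ∈ ['.', '-', '_', '+']
        · rw [if_pos ((contains_sepChars _).mpr h3)]
          simp only [true_iff]
          exact ⟨p, List.mem_cons_self ..,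
            Or.inr ⟨hpre, hlen, cs[p.length], List.getElem?_eq_getElem hlen, h3⟩⟩
        · rw [if_neg (fun hc => h3 ((contains_sepChars _).mp hc)), ih]
          constructor
          · rintro ⟨q, hq, hh⟩; exact ⟨q, List.mem_cons_of_mem _ hq, hh⟩
          · rintro ⟨q, hq, hh⟩
            rcases List.mem_cons.mp hq with rfl | hq'
            · rcases hh with h | ⟨_, hlen', sep, hsep, hmem⟩
              · exact absurd h h1
              · rw [List.getElem?_eq_getElem hlen] at hsep
                cases hsep
                exact absurd hmem h3
            · exact ⟨q, hq', hh⟩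
      · rw [if_neg (by simp only [Bool.and_eq_true, decide_eq_true_eq]; exact h2), ih]
        constructor
        · rintro ⟨q, hq, hh⟩; exact ⟨q, List.mem_cons_of_mem _ hq, hh⟩
        · rintro ⟨q, hq, hh⟩
          rcases List.mem_cons.mp hq with rfl | hq'
          · rcases hh with h | ⟨hpre, hlen', _⟩
            · exact absurd h h1
            · exact absurd ⟨(PySem.Chars.startswith_iff cs q).mpr hpre,
                by simpa [PySem.Chars.len_eq] using hlen'⟩ h2
          · exact ⟨q, hq', hh⟩

theorem roleLoopB_iff (cs : List Char) (pairs : List (Int × Char)) :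
    roleLoopB cs pairs = true ↔
      ∃ q ∈ pairs, q.2 ∈ ['.', '-', '_', '+'] ∧ PySem.Chars.slice cs none (some q.1) ∈ rolePrefixes := by
  induction pairs with
  | nil => simp [roleLoopB]
  | cons q rest ih =>
    obtain ⟨i, ch⟩ := q
    simp only [roleLoopB]
    by_cases hc : PySem.Set.contains sepChars ch = true ∧
        PySem.Set.contains rolePrefixes (PySem.Chars.slice cs none (some i)) = true
    · rw [if_pos (by rw [hc.1, hc.2]; rfl)]
      simp only [true_iff]
      exact ⟨(i, ch), List.mem_cons_self ..,
        (contains_sepChars _).mp hc.1, (PySem.Set.contains_iff _ _).mp hc.2⟩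
    · rw [if_neg (by simp only [Bool.and_eq_true]; exact hc), ih]
      constructor
      · rintro ⟨q, hq, hh⟩; exact ⟨q, List.mem_cons_of_mem _ hq, hh⟩
      · rintro ⟨q, hq, hh⟩
        rcases List.mem_cons.mp hq with rfl | hq'
        · exact absurd ⟨(contains_sepChars _).mpr hh.1, (PySem.Set.contains_iff _ _).mpr hh.2⟩ hc
        · exact ⟨q, hq', hh⟩

theorem alt_iff (local_ : String) :
    is_role_account_alt local_ = true ↔ ∃ p ∈ rolePrefixes, hits local_.toList p := by
  set cs := local_.toList with hcs
  unfold is_role_account_alt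
  rw [← hcs]
  by_cases h0 : PySem.Set.contains rolePrefixes cs = true
  · rw [if_pos h0]
    simp only [true_iff]
    exact ⟨cs, (PySem.Set.contains_iff _ _).mp h0, Or.inl rfl⟩
  · rw [if_neg h0, roleLoopB_iff]
    constructor
    · rintro ⟨⟨i, ch⟩, hq, hsep, hmem⟩
      rw [PySem.List.mem_enumerate_iff] at hq
      obtain ⟨k, hk, hqe⟩ := hq
      obtain ⟨hi, hch⟩ := Prod.mk.injEq .. ▸ hqe
      subst hch
      have hi' : i = (k : Int) := by simpa using hi
      subst hi'
      rw [PySem.Chars.slice_eq_listSlice, PySem.List.slice_to_natCast] at hmem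
      refine ⟨cs.take k, hmem, Or.inr ⟨List.take_prefix k cs, ?_, cs[k], ?_, hsep⟩⟩
      · simpa [List.length_take, Nat.min_eq_left hk.le] using hk
      · rw [List.length_take, Nat.min_eq_left hk.le]
        exact List.getElem?_eq_getElem hk
    · rintro ⟨p, hp, hh⟩
      rcases hh with h | ⟨hpre, hlen, sep, hsep, hmem⟩
      · exact absurd ((PySem.Set.contains_iff _ _).mpr (h ▸ hp)) h0
      · have hget : cs[p.length]'hlen = sep := by
          rw [List.getElem?_eq_getElem hlen] at hsep; exact Option.some.inj hsep
        refine ⟨((p.length : Int), sep), ?_, hmem, ?_⟩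
        · rw [PySem.List.mem_enumerate_iff]
          exact ⟨p.length, hlen, by simp [hget]⟩
        · rw [PySem.Chars.slice_eq_listSlice, PySem.List.slice_to_natCast]
          rwa [List.prefix_iff_eq_take.mp hpre] at hp

theorem a_iff (local_ : String) :
    is_role_account local_ = true ↔ ∃ p ∈ rolePrefixes, hits local_.toList p :=
  roleLoopA_iff local_.toList rolePrefixes

-- ===== VERDICT (by name: the statement is the Claim_ definition above) =====
theorem is_role_account_spec : Claim_equal_is_role_account := by
  intro local_ _
  unfold Spec_is_role_account
  have := (a_iff local_).trans (alt_iff local_).symm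
  exact Bool.coe_iff_coe.mp this
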